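-- pv_equiv track=rewrite | github.com/AlexandreRiedo/leadsheet-utility | src/leadsheet_utility/backing/walking_bass.py | _pick_in_direction
-- ===== SOURCE A (Python) =====
-- def _closest(target: int, candidates: list[int]) -> int:
--     """Return the candidate nearest to *target*."""
--     return min(candidates, key=lambda n: abs(n - target))
--
-- def _pick_in_direction(
--     pool: list[int], reference: int, go_up: bool, avoid: int | None = None,
-- ) -> int:
--     """Nearest note above/below *reference* from *pool*, skipping *avoid*."""
--     if go_up:
--         cands = sorted(n for n in pool if n > reference)
--     else:
--         cands = sorted((n for n in pool if n < reference), reverse=True)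
--     if avoid is not None:
--         filtered = [n for n in cands if n != avoid]
--         if filtered:
--             cands = filtered
--     if cands:
--         return cands[0]
--     # Nothing in preferred direction — nearest different note in pool
--     fallback = [n for n in pool if n != reference]
--     if avoid is not None:
--         pref = [n for n in fallback if n != avoid]
--         if pref:
--             fallback = pref
--     return _closest(reference, fallback) if fallback else reference
-- ===== SOURCE B (Python) =====
-- def _pick_in_direction(pool, reference, go_up, avoid=None):
--     """Nearest note above/below *reference* from *pool*, skipping *avoid* —
--     one priority selection instead of sort + fallback branches."""
--     candidates = [n for n in pool if n != reference]
--     if not candidates: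
--         return reference
--
--     def priority(n):
--         in_direction = n > reference if go_up else n < reference
--         return (0 if in_direction else 1,
--                 1 if n == avoid else 0,
--                 abs(n - reference))
--
--     return min(candidates, key=priority)
-- ===== Notes on version B (the rewrite author's own statement) =====
-- stated objective: simpler
-- what changed: Replaces A's sort-the-direction-side / avoid-filter / separate fallback-with-_closest branches by one pass: filter out the reference and take the single min under the composite key (in-direction tier, avoided tier, distance).
import Mathlib
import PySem

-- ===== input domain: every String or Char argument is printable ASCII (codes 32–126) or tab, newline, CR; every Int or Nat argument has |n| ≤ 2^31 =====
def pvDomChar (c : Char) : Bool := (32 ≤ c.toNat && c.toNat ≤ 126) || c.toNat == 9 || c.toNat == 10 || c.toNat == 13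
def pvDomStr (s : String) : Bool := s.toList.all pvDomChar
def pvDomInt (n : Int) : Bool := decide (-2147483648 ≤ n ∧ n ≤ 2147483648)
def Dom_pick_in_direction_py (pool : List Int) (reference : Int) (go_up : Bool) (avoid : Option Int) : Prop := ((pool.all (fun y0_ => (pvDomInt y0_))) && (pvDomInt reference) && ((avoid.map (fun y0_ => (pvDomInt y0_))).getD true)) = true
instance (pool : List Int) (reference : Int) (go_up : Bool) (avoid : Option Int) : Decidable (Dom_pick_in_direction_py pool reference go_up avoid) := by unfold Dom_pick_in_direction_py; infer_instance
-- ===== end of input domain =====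

-- B replaces A's sort / avoid-filter / separate fallback-with-_closest branches by one pass: min of pool-minus-reference under a composite (direction tier, avoided tier, distance) key.


-- ===== PORT A =====
def closest_py (target : Int) (candidates : List Int) : Int :=
  (PySem.List.min? candidates (fun n => |n - target|)).getD target

def pick_in_direction_py (pool : List Int) (reference : Int) (go_up : Bool) (avoid : Option Int) : Int :=
  let cands0 :=
    if go_up then PySem.List.sorted (pool.filter (fun n => decide (reference < n))) (fun n => n) false
    else PySem.List.sorted (pool.filter (fun n => decide (n < reference))) (fun n => n) true
  let cands :=
    match avoid with
    | some a =>
        let filtered := cands0.filter (fun n => n != a)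
        if filtered.isEmpty then cands0 else filtered
    | none => cands0
  match cands with
  | c :: _ => c
  | [] =>
      let fallback0 := pool.filter (fun n => n != reference)
      let fallback :=
        match avoid with
        | some a =>
            let pref := fallback0.filter (fun n => n != a)
            if pref.isEmpty then fallback0 else pref
        | none => fallback0
      if fallback.isEmpty then reference else closest_py reference fallback

-- ===== PORT B =====
-- B-side helpers: Python's tuple `<` on the 3-component priority key, and the key itself
def pyTripleLt (p q : Int × Int × Int) : Bool :=
  decide (p.1 < q.1 ∨ (p.1 = q.1 ∧ (p.2.1 < q.2.1 ∨ (p.2.1 = q.2.1 ∧ p.2.2 < q.2.2))))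

def priority_py (reference : Int) (go_up : Bool) (avoid : Option Int) (n : Int) : Int × Int × Int :=
  ( if (if go_up then decide (reference < n) else decide (n < reference)) then 0 else 1
  , match avoid with | some a => if n = a then 1 else 0 | none => 0
  , |n - reference| )

def pick_in_direction_py_alt (pool : List Int) (reference : Int) (go_up : Bool) (avoid : Option Int) : Int :=
  let candidates := pool.filter (fun n => n != reference)
  match candidates with
  | [] => reference
  | c :: rest =>
      rest.foldl (fun best n =>
        if pyTripleLt (priority_py reference go_up avoid n) (priority_py reference go_up avoid best)
        then n else best) c


-- ===== PRECONDITION & SPEC =====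
def Spec_pick_in_direction_py (pool : List Int) (reference : Int) (go_up : Bool) (avoid : Option Int) (out : Int) : Prop := out = pick_in_direction_py_alt pool reference go_up avoid
instance (pool : List Int) (reference : Int) (go_up : Bool) (avoid : Option Int) (out : Int) : Decidable (Spec_pick_in_direction_py pool reference go_up avoid out) := by unfold Spec_pick_in_direction_py; infer_instance

-- ===== CLAIM (what is proved, stated in full; the proofs are below) =====
def Claim_equal_pick_in_direction_py : Prop := ∀ (pool : List Int) (reference : Int) (go_up : Bool) (avoid : Option Int), Dom_pick_in_direction_py pool reference go_up avoid → Spec_pick_in_direction_py pool reference go_up avoid (pick_in_direction_py pool reference go_up avoid)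

-- ===== LEMMAS AND PROOFS =====

def FirstMin (lt : Int → Int → Prop) [DecidableRel lt] (l : List Int) (m : Int) : Prop :=
  m ∈ l ∧ (∀ y ∈ l, ¬ lt y m) ∧
    ∃ l1 l2, l = l1 ++ m :: l2 ∧ ∀ y ∈ l1, lt m y

theorem ffold_firstMin (lt : Int → Int → Prop) [DecidableRel lt]
    (hirr : ∀ a, ¬ lt a a)
    (htr1 : ∀ x m y, lt x m → ¬ lt y m → lt x y)
    (htr2 : ∀ a b c, lt a b → lt b c → lt a c)
    (c : Int) (rest : List Int) :
    FirstMin lt (c :: rest) (rest.foldl (fun b n => if lt n b then n else b) c) := by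
  induction rest generalizing c with
  | nil =>
      refine ⟨List.mem_singleton.mpr rfl, ?_, [], [], rfl, by simp⟩
      intro y hy; rw [List.mem_singleton] at hy; rw [hy]; exact hirr c
  | cons n rest ih =>
      simp only [List.foldl_cons]
      by_cases hnc : lt n c
      · rw [if_pos hnc]
        obtain ⟨hmem, hmin, l1, l2, hsplit, hfirst⟩ := ih n
        set m := rest.foldl (fun b n => if lt n b then n else b) n with hm
        have hmc : lt m c := by
          cases l1 with
          | nil =>
              have : n = m := by simpa using congrArg (·.head?) hsplit
              exact this ▸ hnc
          | cons z l1' =>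
              rw [List.cons_append] at hsplit
              injection hsplit with h1 _
              subst h1
              exact htr2 m n c (hfirst n (by simp)) hnc
        have hcm : ¬ lt c m := by
          intro h
          have h1 : lt c n := htr1 c m n h (hmin n (by simp))
          exact hirr c (htr2 c n c h1 hnc)
        have hmem' : m ∈ c :: n :: rest := by
          rcases List.mem_cons.mp hmem with h | h
          · simp [h]
          · simp [h]
        refine ⟨hmem', ?_, c :: l1, l2, by simp [hsplit], ?_⟩
        · intro y hy
          rcases List.mem_cons.mp hy with h | hy'
          · rw [h]; exact hcm
          · exact hmin y hy'
        · intro y hy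
          rcases List.mem_cons.mp hy with h | hy'
          · rw [h]; exact hmc
          · exact hfirst y hy'
      · rw [if_neg hnc]
        obtain ⟨hmem, hmin, l1, l2, hsplit, hfirst⟩ := ih c
        set m := rest.foldl (fun b n => if lt n b then n else b) c with hm
        have hnm : ¬ lt n m := by
          intro h
          exact hnc (htr1 n m c h (hmin c (by simp)))
        cases l1 with
        | nil =>
            simp only [List.nil_append] at hsplit
            injection hsplit with h1 h2
            refine ⟨List.mem_cons.mpr (Or.inl h1.symm), ?_, [], n :: rest, by simp [h1], by simp⟩
            intro y hy
            rcases List.mem_cons.mp hy with h | hy'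
            · rw [h, h1]; exact hmin m hmem
            · rcases List.mem_cons.mp hy' with h | hy''
              · rw [h]; exact hnm
              · exact hmin y (by simp [hy''])
        | cons z l1' =>
            rw [List.cons_append] at hsplit
            injection hsplit with h1 h2
            subst h1
            have hmz : lt m c := hfirst c (by simp)
            have hmn : lt m n := htr1 m c n hmz hnc
            have hmem' : m ∈ c :: n :: rest := by
              rcases List.mem_cons.mp hmem with h | h
              · exact List.mem_cons.mpr (Or.inl h)
              · simp [h]
            refine ⟨hmem', ?_, c :: n :: l1', l2, by simp [h2], ?_⟩
            · intro y hy
              rcases List.mem_cons.mp hy with h | hy'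
              · rw [h]; exact hmin c (by simp)
              · rcases List.mem_cons.mp hy' with h | hy''
                · rw [h]; exact hnm
                · exact hmin y (by simp [hy''])
            · intro y hy
              rcases List.mem_cons.mp hy with h | hy'
              · rw [h]; exact hmz
              · rcases List.mem_cons.mp hy' with h | hy''
                · rw [h]; exact hmn
                · exact hfirst y (by simp [hy''])

theorem min?_cons_eq (key : Int → Int) (f : Int) (r : List Int) :
    PySem.List.min? (f :: r) key =
      some (r.foldl (fun b n => if key n < key b then n else b) f) := by
  simp only [PySem.List.min?, List.foldl_cons]
  induction r generalizing f with
  | nil => rfl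
  | cons n r ih =>
      simp only [List.foldl_cons]
      by_cases h : key n < key f
      · simp only [if_pos h]; exact ih n
      · simp only [if_neg h]; exact ih f

theorem sorted_head_min (X : List Int) (h : Int) (t : List Int)
    (hs : PySem.List.sorted X (fun n => n) false = h :: t) :
    h ∈ X ∧ ∀ y ∈ X, h ≤ y := by
  have hperm := PySem.List.sorted_perm X (fun n => n) false
  rw [hs] at hperm
  have hpw := PySem.List.sorted_pairwise X (fun n => n)
  rw [hs] at hpw
  refine ⟨hperm.mem_iff.mp (by simp), ?_⟩
  intro y hy
  rcases List.mem_cons.mp (hperm.mem_iff.mpr hy) with rfl | hy'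
  · exact le_refl y
  · exact (List.pairwise_cons.mp hpw).1 y hy'

theorem sorted_head_max (X : List Int) (h : Int) (t : List Int)
    (hs : PySem.List.sorted X (fun n => n) true = h :: t) :
    h ∈ X ∧ ∀ y ∈ X, y ≤ h := by
  have hperm := PySem.List.sorted_perm X (fun n => n) true
  rw [hs] at hperm
  have hpw := PySem.List.sorted_pairwise_rev X (fun n => n)
  rw [hs] at hpw
  refine ⟨hperm.mem_iff.mp (by simp), ?_⟩
  intro y hy
  rcases List.mem_cons.mp (hperm.mem_iff.mpr hy) with rfl | hy'
  · exact le_refl y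
  · exact (List.pairwise_cons.mp hpw).1 y hy'

theorem sorted_filter_head_min (X : List Int) (p : Int → Bool) (h : Int) (t : List Int)
    (hs : (PySem.List.sorted X (fun n => n) false).filter p = h :: t) :
    h ∈ X.filter p ∧ ∀ y ∈ X.filter p, h ≤ y := by
  have hperm : ((PySem.List.sorted X (fun n => n) false).filter p).Perm (X.filter p) :=
    (PySem.List.sorted_perm X (fun n => n) false).filter p
  rw [hs] at hperm
  have hpw : List.Pairwise (fun a b : Int => a ≤ b) ((PySem.List.sorted X (fun n => n) false).filter p) :=
    List.Pairwise.filter p (PySem.List.sorted_pairwise X (fun n => n))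
  rw [hs] at hpw
  refine ⟨hperm.mem_iff.mp (by simp), ?_⟩
  intro y hy
  rcases List.mem_cons.mp (hperm.mem_iff.mpr hy) with rfl | hy'
  · exact le_refl y
  · exact (List.pairwise_cons.mp hpw).1 y hy'

theorem sorted_filter_head_max (X : List Int) (p : Int → Bool) (h : Int) (t : List Int)
    (hs : (PySem.List.sorted X (fun n => n) true).filter p = h :: t) :
    h ∈ X.filter p ∧ ∀ y ∈ X.filter p, y ≤ h := by
  have hperm : ((PySem.List.sorted X (fun n => n) true).filter p).Perm (X.filter p) :=
    (PySem.List.sorted_perm X (fun n => n) true).filter p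
  rw [hs] at hperm
  have hpw : List.Pairwise (fun a b : Int => b ≤ a) ((PySem.List.sorted X (fun n => n) true).filter p) :=
    List.Pairwise.filter p (PySem.List.sorted_pairwise_rev X (fun n => n))
  rw [hs] at hpw
  refine ⟨hperm.mem_iff.mp (by simp), ?_⟩
  intro y hy
  rcases List.mem_cons.mp (hperm.mem_iff.mpr hy) with rfl | hy'
  · exact le_refl y
  · exact (List.pairwise_cons.mp hpw).1 y hy'

theorem two_split_eq (l p1 p2 q1 q2 : List Int) (a b : Int)
    (h1 : l = p1 ++ a :: p2) (h2 : l = q1 ++ b :: q2)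
    (ha : a ∉ q1) (hb : b ∉ p1) : a = b := by
  subst h1
  induction p1 generalizing q1 with
  | nil =>
      cases q1 with
      | nil => simpa using congrArg (·.head?) h2
      | cons x q1' =>
          exfalso
          have : a = x := by simpa using congrArg (·.head?) h2
          exact ha (this ▸ List.mem_cons_self ..)
  | cons x p1' ih =>
      cases q1 with
      | nil =>
          exfalso
          have : x = b := by simpa using congrArg (·.head?) h2
          exact hb (this ▸ List.mem_cons_self ..)
      | cons y q1' =>
          rw [List.cons_append, List.cons_append] at h2
          injection h2 with hxy h2'
          exact ih (q1 := q1') (h2 := h2') (ha := fun m => ha (List.mem_cons_of_mem y m))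
            (hb := fun m => hb (List.mem_cons_of_mem x m))

theorem pyTripleLt_true_iff (p q : Int × Int × Int) :
    pyTripleLt p q = true ↔
      (p.1 < q.1 ∨ (p.1 = q.1 ∧ (p.2.1 < q.2.1 ∨ (p.2.1 = q.2.1 ∧ p.2.2 < q.2.2)))) := by
  simp [pyTripleLt]

theorem fb_eq (ref : Int) (go_up : Bool) (avoid : Option Int) (C pref : List Int) (mA mB : Int)
    (q : Int → Bool)
    (hpref : pref = C.filter q)
    (hq : ∀ n, q n = true ↔ (priority_py ref go_up avoid n).2.1 = 0)
    (hbnd : ∀ n, 0 ≤ (priority_py ref go_up avoid n).2.1 ∧ (priority_py ref go_up avoid n).2.1 ≤ 1)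
    (ht1 : ∀ n ∈ C, (priority_py ref go_up avoid n).1 = 1)
    (hA : FirstMin (fun x y => |x - ref| < |y - ref|) pref mA)
    (hB : FirstMin (fun x y => pyTripleLt (priority_py ref go_up avoid x) (priority_py ref go_up avoid y) = true) C mB) :
    mA = mB := by
  have hk3 : ∀ n, (priority_py ref go_up avoid n).2.2 = |n - ref| := fun n => rfl
  obtain ⟨hAmem, hAmin, p1, p2, hAsplit, hAfirst⟩ := hA
  obtain ⟨hBmem, hBmin, l1, l2, hBsplit, hBfirst⟩ := hB
  have hAmin' : ∀ y ∈ pref, ¬ (|y - ref| < |mA - ref|) := hAmin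
  have hAfirst' : ∀ y ∈ p1, |mA - ref| < |y - ref| := hAfirst
  have hBmin' : ∀ y ∈ C, ¬ (pyTripleLt (priority_py ref go_up avoid y) (priority_py ref go_up avoid mB) = true) := hBmin
  have hBfirst' : ∀ y ∈ l1, pyTripleLt (priority_py ref go_up avoid mB) (priority_py ref go_up avoid y) = true := hBfirst
  have hmApref := hAmem
  rw [hpref] at hmApref
  have hmAC : mA ∈ C := (List.mem_filter.mp hmApref).1
  have hqmA : q mA = true := (List.mem_filter.mp hmApref).2
  have h2A : (priority_py ref go_up avoid mA).2.1 = 0 := (hq mA).mp hqmA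
  have hnotlt := hBmin' mA hmAC
  rw [pyTripleLt_true_iff] at hnotlt
  have h2B : (priority_py ref go_up avoid mB).2.1 = 0 ∧ |mB - ref| ≤ |mA - ref| := by
    have b1 := ht1 mA hmAC
    have b2 := ht1 mB hBmem
    have b3 := hbnd mB
    rw [hk3, hk3] at hnotlt
    omega
  have hqB : q mB = true := (hq mB).mpr h2B.1
  have hmBpref : mB ∈ pref := by
    rw [hpref]; exact List.mem_filter.mpr ⟨hBmem, hqB⟩
  have habseq : |mA - ref| = |mB - ref| := by
    have := hAmin' mB hmBpref
    have h2 := h2B.2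
    omega
  have hsplit2 : pref = l1.filter q ++ mB :: l2.filter q := by
    rw [hpref, hBsplit, List.filter_append, List.filter_cons_of_pos hqB]
  have hnB : mB ∉ p1 := by
    intro hm
    have := hAfirst' mB hm
    omega
  have hnA : mA ∉ l1.filter q := by
    intro hm
    have hml1 : mA ∈ l1 := (List.mem_filter.mp hm).1
    have := hBfirst' mA hml1
    rw [pyTripleLt_true_iff] at this
    have b1 := ht1 mA hmAC
    have b2 := ht1 mB hBmem
    rw [hk3, hk3] at this
    omega
  exact two_split_eq pref p1 p2 (l1.filter q) (l2.filter q) mA mB hAsplit hsplit2 hnA hnB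

theorem core (pool : List Int) (ref : Int) (go_up : Bool) (avoid : Option Int)
    (dirb : Int → Bool) (S : List Int)
    (hS : (if go_up then PySem.List.sorted (pool.filter (fun n => decide (ref < n))) (fun n => n) false
           else PySem.List.sorted (pool.filter (fun n => decide (n < ref))) (fun n => n) true) = S)
    (hdirb : ∀ n, (if go_up then decide (ref < n) else decide (n < ref)) = dirb n)
    (hne : ∀ n, dirb n = true → n ≠ ref)
    (hinj : ∀ m f, dirb m = true → dirb f = true → |m - ref| = |f - ref| → m = f)
    (hperm : S.Perm (pool.filter dirb))
    (H2 : ∀ h t, S = h :: t → ∀ y ∈ pool.filter dirb, |h - ref| ≤ |y - ref|)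
    (H3 : ∀ a h t, S.filter (fun n => n != a) = h :: t →
        ∀ y ∈ (pool.filter dirb).filter (fun n => n != a), |h - ref| ≤ |y - ref|) :
    pick_in_direction_py pool ref go_up avoid = pick_in_direction_py_alt pool ref go_up avoid := by
  have hk1 : ∀ n, (priority_py ref go_up avoid n).1 = if dirb n then (0:Int) else 1 := by
    intro n; simp only [priority_py]; rw [hdirb n]
  have hk3 : ∀ n, (priority_py ref go_up avoid n).2.2 = |n - ref| := fun n => rfl
  have hbnd : ∀ n, 0 ≤ (priority_py ref go_up avoid n).2.1 ∧ (priority_py ref go_up avoid n).2.1 ≤ 1 := by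
    intro n
    cases avoid with
    | none => simp [priority_py]
    | some a => by_cases h : n = a <;> simp [priority_py, h]
  have hirr' : ∀ x : Int, ¬ (pyTripleLt (priority_py ref go_up avoid x) (priority_py ref go_up avoid x) = true) := by
    intro x h; rw [pyTripleLt_true_iff] at h; omega
  have htr1' : ∀ x m y : Int, pyTripleLt (priority_py ref go_up avoid x) (priority_py ref go_up avoid m) = true →
      ¬ (pyTripleLt (priority_py ref go_up avoid y) (priority_py ref go_up avoid m) = true) →
      pyTripleLt (priority_py ref go_up avoid x) (priority_py ref go_up avoid y) = true := by
    intro x m y h1 h2; rw [pyTripleLt_true_iff] at *; omega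
  have htr2' : ∀ x m y : Int, pyTripleLt (priority_py ref go_up avoid x) (priority_py ref go_up avoid m) = true →
      pyTripleLt (priority_py ref go_up avoid m) (priority_py ref go_up avoid y) = true →
      pyTripleLt (priority_py ref go_up avoid x) (priority_py ref go_up avoid y) = true := by
    intro x m y h1 h2; rw [pyTripleLt_true_iff] at *; omega
  have hAirr : ∀ x : Int, ¬ (|x - ref| < |x - ref|) := by intro x; omega
  have hAtr1 : ∀ x m y : Int, |x - ref| < |m - ref| → ¬ (|y - ref| < |m - ref|) → |x - ref| < |y - ref| := by
    intro x m y h1 h2; omega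
  have hAtr2 : ∀ x m y : Int, |x - ref| < |m - ref| → |m - ref| < |y - ref| → |x - ref| < |y - ref| := by
    intro x m y h1 h2; omega
  simp only [pick_in_direction_py, pick_in_direction_py_alt]
  rw [hS]
  cases hC : pool.filter (fun n => n != ref) with
  | nil =>
      have hall : ∀ n ∈ pool, n = ref := by
        intro n hn
        have := List.filter_eq_nil_iff.mp hC n hn
        simpa using this
      have hU : pool.filter dirb = [] := by
        refine List.filter_eq_nil_iff.mpr ?_
        intro n hn h
        exact hne n h (hall n hn)
      have hSnil : S = [] := by
        rw [hU] at hperm; exact hperm.eq_nil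
      cases avoid <;> simp [hSnil, hC]
  | cons c rest =>
      have hUC : ∀ x, x ∈ pool.filter dirb → x ∈ c :: rest := by
        intro x hx
        obtain ⟨hp, hd⟩ := List.mem_filter.mp hx
        rw [← hC]
        exact List.mem_filter.mpr ⟨hp, by simpa using hne x hd⟩
      by_cases hU : pool.filter dirb = []
      · -- nothing in the preferred direction: A falls back
        have hnd : ∀ x ∈ (c :: rest : List Int), dirb x = false := by
          intro x hx
          rw [← hC] at hx
          have hxp := (List.mem_filter.mp hx).1
          have := List.filter_eq_nil_iff.mp hU x hxp
          simpa using this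
        have ht1 : ∀ n ∈ (c :: rest : List Int), (priority_py ref go_up avoid n).1 = 1 := by
          intro n hn; rw [hk1, hnd n hn]; simp
        have hSnil : S = [] := by rw [hU] at hperm; exact hperm.eq_nil
        cases avoid with
        | none =>
            simp only [hSnil, List.filter_nil, List.isEmpty_nil, if_true, List.isEmpty_cons,
              Bool.false_eq_true, if_false, closest_py]
            rw [min?_cons_eq]
            simp only [Option.getD_some]
            have hAfm := ffold_firstMin (fun x y => |x - ref| < |y - ref|) hAirr hAtr1 hAtr2 c rest
            have hBfm := ffold_firstMin
              (fun x y => pyTripleLt (priority_py ref go_up none x) (priority_py ref go_up none y) = true)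
              hirr' htr1' htr2' c rest
            exact fb_eq ref go_up none (c :: rest) (c :: rest) _ _ (fun _ => true)
              (by simp) (by intro n; simp [priority_py]) hbnd ht1 hAfm hBfm
        | some a =>
            simp only [hSnil, List.filter_nil, List.isEmpty_nil, if_true]
            have hBfm := ffold_firstMin
              (fun x y => pyTripleLt (priority_py ref go_up (some a) x) (priority_py ref go_up (some a) y) = true)
              hirr' htr1' htr2' c rest
            by_cases hp : ((c :: rest).filter (fun n => n != a)) = []
            · have hall : ∀ n ∈ (c :: rest : List Int), n = a := by
                intro n hn
                have := List.filter_eq_nil_iff.mp hp n hn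
                simpa using this
              simp only [hp, List.isEmpty_nil, if_true, List.isEmpty_cons,
                Bool.false_eq_true, if_false, closest_py]
              rw [min?_cons_eq]
              simp only [Option.getD_some]
              have hAfm := ffold_firstMin (fun x y => |x - ref| < |y - ref|) hAirr hAtr1 hAtr2 c rest
              have h1 : (rest.foldl (fun b n => if |n - ref| < |b - ref| then n else b) c) = a :=
                hall _ hAfm.1
              have h2 : (rest.foldl (fun b n =>
                  if pyTripleLt (priority_py ref go_up (some a) n) (priority_py ref go_up (some a) b) = true
                  then n else b) c) = a := hall _ hBfm.1
              rw [h1, h2]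
            · cases hpc : ((c :: rest).filter (fun n => n != a)) with
              | nil => exact absurd hpc hp
              | cons f r =>
                  simp only [hpc, List.isEmpty_cons, Bool.false_eq_true, if_false, closest_py]
                  rw [min?_cons_eq]
                  simp only [Option.getD_some]
                  have hAfm := ffold_firstMin (fun x y => |x - ref| < |y - ref|) hAirr hAtr1 hAtr2 f r
                  rw [← hpc] at hAfm
                  refine fb_eq ref go_up (some a) (c :: rest) ((c :: rest).filter (fun n => n != a)) _ _
                    (fun n => n != a) rfl ?_ hbnd ht1 hAfm hBfm
                  intro n
                  by_cases h : n = a <;> simp [priority_py, h]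
      · -- something in the preferred direction
        obtain ⟨c0, t0, hS0⟩ : ∃ c0 t0, S = c0 :: t0 := by
          cases hs : S with
          | nil => rw [hs] at hperm; exact absurd hperm.symm.eq_nil hU
          | cons c0 t0 => exact ⟨c0, t0, rfl⟩
        cases avoid with
        | none =>
            have hk2n : ∀ n, (priority_py ref go_up none n).2.1 = 0 := fun _ => rfl
            have hBfm := ffold_firstMin
              (fun x y => pyTripleLt (priority_py ref go_up none x) (priority_py ref go_up none y) = true)
              hirr' htr1' htr2' c rest
            obtain ⟨hBmem, hBmin, -⟩ := hBfm
            set mB := rest.foldl (fun b n =>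
              if pyTripleLt (priority_py ref go_up none n) (priority_py ref go_up none b) = true
              then n else b) c with hmBdef
            have hBmin' : ∀ y ∈ (c :: rest : List Int),
                ¬ (pyTripleLt (priority_py ref go_up none y) (priority_py ref go_up none mB) = true) := hBmin
            have hmBpool : mB ∈ pool := by
              have := hBmem; rw [← hC] at this; exact (List.mem_filter.mp this).1
            rw [hS0]
            show c0 = mB
            have hc0U : c0 ∈ pool.filter dirb := hperm.mem_iff.mp (by rw [hS0]; simp)
            have hc0d : dirb c0 = true := (List.mem_filter.mp hc0U).2
            have habs0 := H2 c0 t0 hS0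
            have hnb := hBmin' c0 (hUC c0 hc0U)
            rw [pyTripleLt_true_iff] at hnb
            rw [hk1, hk1, if_pos hc0d, hk3, hk3, hk2n, hk2n] at hnb
            have hdB : dirb mB = true := by
              by_cases h : dirb mB
              · exact h
              · rw [if_neg h] at hnb; omega
            rw [if_pos hdB] at hnb
            have hmBU : mB ∈ pool.filter dirb := List.mem_filter.mpr ⟨hmBpool, hdB⟩
            have habsB : ∀ f ∈ pool.filter dirb, |mB - ref| ≤ |f - ref| := by
              intro f hf
              have hfd : dirb f = true := (List.mem_filter.mp hf).2
              have hh := hBmin' f (hUC f hf)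
              rw [pyTripleLt_true_iff] at hh
              rw [hk1, hk1, if_pos hfd, if_pos hdB, hk3, hk3, hk2n, hk2n] at hh
              omega
            exact hinj c0 mB hc0d hdB (by
              have := habs0 mB hmBU
              have := habsB c0 hc0U
              omega)
        | some a =>
            have hk2 : ∀ n, (priority_py ref go_up (some a) n).2.1 = if n = a then (1:Int) else 0 :=
              fun _ => rfl
            have hBfm := ffold_firstMin
              (fun x y => pyTripleLt (priority_py ref go_up (some a) x) (priority_py ref go_up (some a) y) = true)
              hirr' htr1' htr2' c rest
            obtain ⟨hBmem, hBmin, -⟩ := hBfm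
            set mB := rest.foldl (fun b n =>
              if pyTripleLt (priority_py ref go_up (some a) n) (priority_py ref go_up (some a) b) = true
              then n else b) c with hmBdef
            have hBmin' : ∀ y ∈ (c :: rest : List Int),
                ¬ (pyTripleLt (priority_py ref go_up (some a) y) (priority_py ref go_up (some a) mB) = true) := hBmin
            have hmBpool : mB ∈ pool := by
              have := hBmem; rw [← hC] at this; exact (List.mem_filter.mp this).1
            cases hF : S.filter (fun n => n != a) with
            | nil =>
                have hall : ∀ n ∈ S, n = a := by
                  intro n hn
                  have := List.filter_eq_nil_iff.mp hF n hn
                  simpa using this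
                have hc0a : c0 = a := hall c0 (by rw [hS0]; simp)
                simp only [hF, List.isEmpty_nil, if_true]
                rw [hS0]
                show c0 = mB
                have hc0U : c0 ∈ pool.filter dirb := hperm.mem_iff.mp (by rw [hS0]; simp)
                have hc0d : dirb c0 = true := (List.mem_filter.mp hc0U).2
                have hnb := hBmin' c0 (hUC c0 hc0U)
                rw [pyTripleLt_true_iff] at hnb
                rw [hk1, hk1, if_pos hc0d, hk3, hk3, hk2, hk2] at hnb
                have hdB : dirb mB = true := by
                  by_cases h : dirb mB
                  · exact h
                  · rw [if_neg h] at hnb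
                    by_cases h2 : mB = a <;> by_cases h3 : c0 = a <;>
                      simp only [h2, h3, if_true, if_false] at hnb <;> omega
                have hmBU : mB ∈ pool.filter dirb := List.mem_filter.mpr ⟨hmBpool, hdB⟩
                have hmBS : mB ∈ S := hperm.mem_iff.mpr hmBU
                rw [hc0a, hall mB hmBS]
            | cons h1 t1 =>
                simp only [hF, List.isEmpty_cons, Bool.false_eq_true, if_false]
                show h1 = mB
                have hh1F : h1 ∈ S.filter (fun n => n != a) := by rw [hF]; simp
                have hh1S : h1 ∈ S := (List.mem_filter.mp hh1F).1
                have hh1a : h1 ≠ a := by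
                  have := (List.mem_filter.mp hh1F).2; simpa using this
                have hh1U : h1 ∈ pool.filter dirb := hperm.mem_iff.mp hh1S
                have hh1d : dirb h1 = true := (List.mem_filter.mp hh1U).2
                have habsF := H3 a h1 t1 hF
                have hnb := hBmin' h1 (hUC h1 hh1U)
                rw [pyTripleLt_true_iff] at hnb
                rw [hk1, hk1, if_pos hh1d, hk3, hk3, hk2, hk2, if_neg hh1a] at hnb
                have hdB : dirb mB = true := by
                  by_cases h : dirb mB
                  · exact h
                  · rw [if_neg h] at hnb
                    by_cases h2 : mB = a <;> simp only [h2, if_true, if_false] at hnb <;> omega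
                rw [if_pos hdB] at hnb
                have hmBa : mB ≠ a := by
                  by_cases h2 : mB = a
                  · rw [if_pos h2] at hnb; omega
                  · exact h2
                rw [if_neg hmBa] at hnb
                have hmBU : mB ∈ pool.filter dirb := List.mem_filter.mpr ⟨hmBpool, hdB⟩
                have hmBF : mB ∈ (pool.filter dirb).filter (fun n => n != a) :=
                  List.mem_filter.mpr ⟨hmBU, by simpa using hmBa⟩
                have habsB : ∀ f ∈ (pool.filter dirb).filter (fun n => n != a), |mB - ref| ≤ |f - ref| := by
                  intro f hf
                  obtain ⟨hfU, hfa⟩ := List.mem_filter.mp hf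
                  have hfd : dirb f = true := (List.mem_filter.mp hfU).2
                  have hfa' : f ≠ a := by simpa using hfa
                  have hh := hBmin' f (hUC f hfU)
                  rw [pyTripleLt_true_iff] at hh
                  rw [hk1, hk1, if_pos hfd, if_pos hdB, hk3, hk3, hk2, hk2,
                    if_neg hfa', if_neg hmBa] at hh
                  omega
                have hh1F' : h1 ∈ (pool.filter dirb).filter (fun n => n != a) :=
                  List.mem_filter.mpr ⟨hh1U, by simpa using hh1a⟩
                exact hinj h1 mB hh1d hdB (by
                  have := habsF mB hmBF
                  have := habsB h1 hh1F'
                  omega)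

theorem main_eq (pool : List Int) (reference : Int) (go_up : Bool) (avoid : Option Int) :
    pick_in_direction_py pool reference go_up avoid
      = pick_in_direction_py_alt pool reference go_up avoid := by
  cases go_up with
  | true =>
      refine core pool reference true avoid (fun n => decide (reference < n))
        (PySem.List.sorted (pool.filter (fun n => decide (reference < n))) (fun n => n) false)
        (by simp) (fun n => by simp) ?_ ?_
        (PySem.List.sorted_perm _ _ false) ?_ ?_
      · intro n h; simp only [decide_eq_true_eq] at h; omega
      · intro m f hm hf habs
        simp only [decide_eq_true_eq] at hm hf
        rw [abs_of_pos (by omega : (0:Int) < m - reference),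
          abs_of_pos (by omega : (0:Int) < f - reference)] at habs
        omega
      · intro h t hSp y hy
        obtain ⟨hmem, hmin⟩ := sorted_head_min _ h t hSp
        have h1 : reference < h := by simpa using (List.mem_filter.mp hmem).2
        have h2 : reference < y := by simpa using (List.mem_filter.mp hy).2
        have h3 := hmin y hy
        rw [abs_of_pos (by omega : (0:Int) < h - reference),
          abs_of_pos (by omega : (0:Int) < y - reference)]
        omega
      · intro a h t hSp y hy
        obtain ⟨hmem, hmin⟩ := sorted_filter_head_min _ _ h t hSp
        have h1 : reference < h := by
          simpa using (List.mem_filter.mp (List.mem_filter.mp hmem).1).2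
        have h2 : reference < y := by
          simpa using (List.mem_filter.mp (List.mem_filter.mp hy).1).2
        have h3 := hmin y hy
        rw [abs_of_pos (by omega : (0:Int) < h - reference),
          abs_of_pos (by omega : (0:Int) < y - reference)]
        omega
  | false =>
      refine core pool reference false avoid (fun n => decide (n < reference))
        (PySem.List.sorted (pool.filter (fun n => decide (n < reference))) (fun n => n) true)
        (by simp) (fun n => by simp) ?_ ?_
        (PySem.List.sorted_perm _ _ true) ?_ ?_
      · intro n h; simp only [decide_eq_true_eq] at h; omega
      · intro m f hm hf habs
        simp only [decide_eq_true_eq] at hm hf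
        rw [abs_of_neg (by omega : m - reference < (0:Int)),
          abs_of_neg (by omega : f - reference < (0:Int))] at habs
        omega
      · intro h t hSp y hy
        obtain ⟨hmem, hmin⟩ := sorted_head_max _ h t hSp
        have h1 : h < reference := by simpa using (List.mem_filter.mp hmem).2
        have h2 : y < reference := by simpa using (List.mem_filter.mp hy).2
        have h3 := hmin y hy
        rw [abs_of_neg (by omega : h - reference < (0:Int)),
          abs_of_neg (by omega : y - reference < (0:Int))]
        omega
      · intro a h t hSp y hy
        obtain ⟨hmem, hmin⟩ := sorted_filter_head_max _ _ h t hSp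
        have h1 : h < reference := by
          simpa using (List.mem_filter.mp (List.mem_filter.mp hmem).1).2
        have h2 : y < reference := by
          simpa using (List.mem_filter.mp (List.mem_filter.mp hy).1).2
        have h3 := hmin y hy
        rw [abs_of_neg (by omega : h - reference < (0:Int)),
          abs_of_neg (by omega : y - reference < (0:Int))]
        omega

-- ===== VERDICT (by name: the statement is the Claim_ definition above) =====
theorem pick_in_direction_py_spec : Claim_equal_pick_in_direction_py := by
  intro pool reference go_up avoid _
  unfold Spec_pick_in_direction_py
  exact main_eq pool reference go_up avoid
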